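-- pv_equiv track=rewrite | github.com/sysy-s/openxtest | find_available_slots.py | get_possible_meetings
-- ===== SOURCE A (Python) =====
-- def get_possible_meetings(calendars, available_slots, min_people):
--     # next level time complexity
--     # finds all meetings that qualify as valid given the command line args
--     # it performs a check (whether the meeting collides with a busy slot of another person)
--     # for every available slot for every available person
--     possible_meetings = [] # list that stores all meetings that satisfy the duration and min people
--     for personal_available_slots in available_slots:
--         for available_slot in personal_available_slots:
--             people_can_attend = 0 # for each slot we count the number of people that can attend the meeting
--             for personal_calendar in calendars:
--                 person_can_attend = True # determines whether
--                 for excluded_slot in personal_calendar: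
--                     # logic that determines whether a time slot overlaps with a potential meeting
--                     # meeting overlaps if is starts or ends during the excluded time slot or it starts before and ends after it
--                     meeting_ends_during_slot = available_slot[1] >= excluded_slot[0] and available_slot[1] <= excluded_slot[1]
--                     meeting_starts_during_slot = available_slot[0] >= excluded_slot[0] and available_slot[0] <= excluded_slot[1]
--                     slot_during_meeting = available_slot[0] <= excluded_slot[0] and available_slot[1] >= excluded_slot[1]
--                     meeting_overlaps_slot = meeting_ends_during_slot or meeting_starts_during_slot or slot_during_meeting
--                     # if meeting overlaps, then the person in question isn't available for this so their state is set to false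
--                     if meeting_overlaps_slot:
--                         person_can_attend = False
--                         break # we can break this loop since this person cannot attend this meeting
--                 if person_can_attend:
--                     people_can_attend += 1 # if none of the busy slots collide with our available meeting we can count this person as valid
--
--             if people_can_attend >= min_people:
--                 possible_meetings.append(available_slot) # since more people than the minimum can attend we consider this a valid meeting
--     return possible_meetings
-- ===== SOURCE B (Python) =====
-- def _bisect(arr, x, left):
--     # insertion point in sorted arr: number of elements < x (left) / <= x (right)
--     lo, hi = 0, len(arr)
--     while lo < hi:
--         mid = (lo + hi) // 2
--         if (arr[mid] < x) if left else (arr[mid] <= x):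
--             lo = mid + 1
--         else:
--             hi = mid
--     return lo
--
--
-- def _prefix_max(xs):
--     if not xs:
--         return []
--     m = xs[0]
--     out = [m]
--     for v in xs[1:]:
--         m = max(m, v)
--         out.append(m)
--     return out
--
--
-- def _suffix_min(xs):
--     if not xs:
--         return []
--     m = xs[-1]
--     out = [m]
--     for v in reversed(xs[:-1]):
--         m = min(m, v)
--         out.append(m)
--     out.reverse()
--     return out
--
--
-- def get_possible_meetings(calendars, available_slots, min_people):
--     # Preprocess each calendar once (sort by start, prefix-max / suffix-min of
--     # ends); then each slot/person check is three binary-search queries: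
--     #   a slot (a, b) conflicts with a busy (s, e) iff b is in [s, e], or a is
--     #   in [s, e], or [a, b] encloses (a <= s and e <= b).
--     people = []
--     for cal in calendars:
--         busy = sorted(cal, key=lambda iv: iv[0])
--         starts = [s for s, _ in busy]
--         ends = [e for _, e in busy]
--         people.append((starts, _prefix_max(ends), _suffix_min(ends)))
--
--     def stab(starts, pm, x):
--         # some busy (s, e) has s <= x <= e
--         k = _bisect(starts, x, False)
--         return k > 0 and pm[k - 1] >= x
--
--     def enclosed(starts, sm, a, b):
--         # some busy (s, e) has a <= s and e <= b
--         j = _bisect(starts, a, True)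
--         return j < len(starts) and sm[j] <= b
--
--     def can_hold(slot):
--         a, b = slot
--         n = 0
--         for starts, pm, sm in people:
--             if not (stab(starts, pm, b) or stab(starts, pm, a)
--                     or enclosed(starts, sm, a, b)):
--                 n += 1
--         return n >= min_people
--
--     # each distinct slot is decided once; repeated slots reuse the verdict
--     flat = [slot for personal_slots in available_slots for slot in personal_slots]
--     verdicts = {}
--     for slot in dict.fromkeys(flat):
--         verdicts[slot] = can_hold(slot)
--     return [slot for slot in flat if verdicts[slot]]
-- ===== Notes on version B (the rewrite author's own statement) =====
-- stated objective: faster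
-- what changed: Instead of scanning every busy interval of every person for every slot, B preprocesses each calendar once (sort by start, prefix-max and suffix-min of end times), decides each (slot, person) conflict with three binary-search queries, and computes the verdict only once per distinct slot via a dictionary.
import Mathlib
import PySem

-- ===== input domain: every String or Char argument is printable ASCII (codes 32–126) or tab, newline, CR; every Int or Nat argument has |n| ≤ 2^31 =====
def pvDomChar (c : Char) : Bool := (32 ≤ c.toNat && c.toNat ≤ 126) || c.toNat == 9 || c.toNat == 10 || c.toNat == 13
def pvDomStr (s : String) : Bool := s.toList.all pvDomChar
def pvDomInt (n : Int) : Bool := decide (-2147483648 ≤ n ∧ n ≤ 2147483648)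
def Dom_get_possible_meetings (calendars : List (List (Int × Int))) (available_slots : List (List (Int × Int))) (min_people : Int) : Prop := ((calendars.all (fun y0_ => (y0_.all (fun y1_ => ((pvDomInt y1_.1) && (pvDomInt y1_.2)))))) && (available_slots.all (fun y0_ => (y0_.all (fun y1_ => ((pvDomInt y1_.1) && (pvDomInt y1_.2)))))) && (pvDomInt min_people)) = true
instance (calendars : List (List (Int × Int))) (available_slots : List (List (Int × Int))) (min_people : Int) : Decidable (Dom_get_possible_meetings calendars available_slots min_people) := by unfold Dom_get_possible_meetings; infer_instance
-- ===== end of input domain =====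

-- B replaces A's scan of every busy interval per slot and person by per-person
-- preprocessing (sort by start, prefix-max / suffix-min of ends) and three
-- binary-search queries per slot/person check (objective: faster).

-- ===== PORT A =====
-- inner 'for excluded_slot in personal_calendar' loop with its break
def aAttend (slot : Int × Int) : List (Int × Int) → Bool
  | [] => true
  | ex :: rest =>
    let meeting_ends_during_slot := decide (slot.2 ≥ ex.1) && decide (slot.2 ≤ ex.2)
    let meeting_starts_during_slot := decide (slot.1 ≥ ex.1) && decide (slot.1 ≤ ex.2)
    let slot_during_meeting := decide (slot.1 ≤ ex.1) && decide (slot.2 ≥ ex.2)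
    let meeting_overlaps_slot := meeting_ends_during_slot || meeting_starts_during_slot || slot_during_meeting
    if meeting_overlaps_slot then false else aAttend slot rest

def get_possible_meetings (calendars : List (List (Int × Int))) (available_slots : List (List (Int × Int))) (min_people : Int) : List (Int × Int) :=
  available_slots.foldl (fun possible_meetings personal_available_slots =>
    personal_available_slots.foldl (fun possible_meetings available_slot =>
      let people_can_attend : Int :=
        calendars.foldl (fun people_can_attend personal_calendar =>
          if aAttend available_slot personal_calendar then people_can_attend + 1
          else people_can_attend) 0
      if people_can_attend ≥ min_people then possible_meetings ++ [available_slot]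
      else possible_meetings) possible_meetings) []

-- ===== PORT B =====
-- _bisect(arr, x, left): 'while lo < hi' loop; arr[mid] is always in range
-- (0 ≤ lo ≤ mid < hi ≤ len), so the getD default is never read
def bBisect (arr : List Int) (x : Int) (left : Bool) (lo hi : Nat) : Nat :=
  if _h : lo < hi then
    let mid := (lo + hi) / 2
    if (if left then decide (arr.getD mid 0 < x) else decide (arr.getD mid 0 ≤ x)) then
      bBisect arr x left (mid + 1) hi
    else
      bBisect arr x left lo mid
  else lo
termination_by hi - lo
decreasing_by all_goals omega

-- the 'for v in xs[1:]' loop of _prefix_max ('m = max(m, v); out.append(m)')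
def pmLoop (m : Int) (out : List Int) : List Int → List Int
  | [] => out
  | v :: rest => pmLoop (max m v) (out ++ [max m v]) rest

def bPrefixMax : List Int → List Int
  | [] => []
  | v :: rest => pmLoop v [v] rest

-- the 'for v in reversed(xs[:-1])' loop of _suffix_min
def smLoop (m : Int) (out : List Int) : List Int → List Int
  | [] => out
  | v :: rest => smLoop (min m v) (out ++ [min m v]) rest

-- xs[-1] is xs.reverse.head and reversed(xs[:-1]) is xs.reverse.tail,
-- so the one match below renders the python's emptiness test + indexing
def bSuffixMin (xs : List Int) : List Int :=
  match xs.reverse with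
  | [] => []
  | m :: rest => (smLoop m [m] rest).reverse

def bStab (starts pm : List Int) (x : Int) : Bool :=
  let k := bBisect starts x false 0 starts.length
  decide (0 < k) && decide (pm.getD (k - 1) 0 ≥ x)

def bEnclosed (starts sm : List Int) (a b : Int) : Bool :=
  let j := bBisect starts a true 0 starts.length
  decide (j < starts.length) && decide (sm.getD j 0 ≤ b)

def bPrep (cal : List (Int × Int)) : List Int × List Int × List Int :=
  let busy := PySem.List.sorted cal (fun iv => iv.1)
  let starts := busy.map (fun p => p.1)
  let ends := busy.map (fun p => p.2)
  (starts, bPrefixMax ends, bSuffixMin ends)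

def bCanHold (people : List (List Int × List Int × List Int)) (min_people : Int) (ab : Int × Int) : Bool :=
  let n : Int := people.foldl (fun n p =>
    if !(bStab p.1 p.2.1 ab.2 || bStab p.1 p.2.1 ab.1 || bEnclosed p.1 p.2.2 ab.1 ab.2)
    then n + 1 else n) 0
  decide (n ≥ min_people)

def get_possible_meetings_alt (calendars : List (List (Int × Int))) (available_slots : List (List (Int × Int))) (min_people : Int) : List (Int × Int) :=
  let people := calendars.foldl (fun acc cal => acc ++ [bPrep cal]) []
  let flat := available_slots.flatMap (fun personal_slots => personal_slots)
  let verdicts := (PySem.List.dedup flat).foldl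
    (fun d slot => PySem.Dict.insert d slot (bCanHold people min_people slot)) PySem.Dict.empty
  -- verdicts[slot]: the key is always present (slot ∈ flat = dedup's source), so getD's default is never read
  flat.filter (fun slot => PySem.Dict.getD verdicts slot false)

-- ===== PRECONDITION & SPEC =====
def Spec_get_possible_meetings (calendars : List (List (Int × Int))) (available_slots : List (List (Int × Int))) (min_people : Int) (out : List (Int × Int)) : Prop := out = get_possible_meetings_alt calendars available_slots min_people
instance (calendars : List (List (Int × Int))) (available_slots : List (List (Int × Int))) (min_people : Int) (out : List (Int × Int)) : Decidable (Spec_get_possible_meetings calendars available_slots min_people out) := by unfold Spec_get_possible_meetings; infer_instance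

-- ===== CLAIM (what is proved, stated in full; the proofs are below) =====
def Claim_equal_get_possible_meetings : Prop := ∀ (calendars : List (List (Int × Int))) (available_slots : List (List (Int × Int))) (min_people : Int), Dom_get_possible_meetings calendars available_slots min_people → Spec_get_possible_meetings calendars available_slots min_people (get_possible_meetings calendars available_slots min_people)

-- ===== LEMMAS AND PROOFS =====

-- A's break loop returns true iff no interval of the calendar overlaps the slot
theorem aAttend_eq_not_any (slot : Int × Int) (cal : List (Int × Int)) :
    aAttend slot cal
      = !(cal.any (fun ex =>
          (decide (slot.2 ≥ ex.1) && decide (slot.2 ≤ ex.2))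
          || (decide (slot.1 ≥ ex.1) && decide (slot.1 ≤ ex.2))
          || (decide (slot.1 ≤ ex.1) && decide (slot.2 ≥ ex.2)))) := by
  induction cal with
  | nil => rfl
  | cons ex rest ih =>
    simp only [aAttend, List.any_cons]
    by_cases h : ((decide (slot.2 ≥ ex.1) && decide (slot.2 ≤ ex.2))
        || (decide (slot.1 ≥ ex.1) && decide (slot.1 ≤ ex.2))
        || (decide (slot.1 ≤ ex.1) && decide (slot.2 ≥ ex.2))) = true
    · simp [h]
    · simp only [Bool.not_eq_true] at h
      simp [h, ih]

-- binary-search loop invariant (strong induction on hi - lo)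
theorem bBisect_go (arr : List Int) (x : Int) (left : Bool) (P : Int → Prop)
    (hPdef : ∀ v, ((if left then decide (v < x) else decide (v ≤ x)) = true) ↔ P v)
    (hmono : ∀ u v : Int, u ≤ v → P v → P u)
    (hsorted : List.Pairwise (· ≤ ·) arr) :
    ∀ (n lo hi : Nat), hi - lo = n → hi ≤ arr.length → lo ≤ hi →
    (∀ j (h : j < arr.length), j < lo → P arr[j]) →
    (∀ j (h : j < arr.length), hi ≤ j → ¬ P arr[j]) →
    lo ≤ bBisect arr x left lo hi ∧ bBisect arr x left lo hi ≤ hi ∧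
    (∀ j (h : j < arr.length), (j < bBisect arr x left lo hi ↔ P arr[j])) := by
  intro n
  induction n using Nat.strong_induction_on with
  | _ n ih =>
    intro lo hi hn hhi hlohi hlo hhi2
    by_cases h : lo < hi
    · have hmidlo : lo ≤ (lo + hi) / 2 := by omega
      have hmidhi : (lo + hi) / 2 < hi := by omega
      have hmidlen : (lo + hi) / 2 < arr.length := by omega
      have hget : arr.getD ((lo + hi) / 2) 0 = arr[(lo + hi) / 2] := List.getD_eq_getElem arr 0 hmidlen
      have hsort := List.pairwise_iff_getElem.mp hsorted
      by_cases hc : P (arr[(lo + hi) / 2])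
      · have hcond : (if left then decide (arr.getD ((lo + hi) / 2) 0 < x) else decide (arr.getD ((lo + hi) / 2) 0 ≤ x)) = true := by
          rw [hget]; exact (hPdef _).mpr hc
        have hstep : bBisect arr x left lo hi = bBisect arr x left ((lo + hi) / 2 + 1) hi := by
          rw [bBisect]; simp only [h, dif_pos, hcond, if_pos]
        rw [hstep]
        have := ih (hi - ((lo + hi) / 2 + 1)) (by omega) ((lo + hi) / 2 + 1) hi rfl hhi (by omega)
          (by
            intro j hj hjlt
            rcases Nat.lt_or_ge j lo with hcase | hcase
            · exact hlo j hj hcase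
            · rcases Nat.eq_or_lt_of_le (Nat.le_of_lt_succ hjlt) with heq | hlt
              · subst heq; exact hc
              · exact hmono _ _ (List.pairwise_iff_getElem.mp hsorted j ((lo + hi) / 2) hj hmidlen hlt) hc)
          hhi2
        exact ⟨by omega, this.2.1, this.2.2⟩
      · have hcond : (if left then decide (arr.getD ((lo + hi) / 2) 0 < x) else decide (arr.getD ((lo + hi) / 2) 0 ≤ x)) = false := by
          rw [hget]
          cases hv : (if left then decide (arr[(lo + hi) / 2] < x) else decide (arr[(lo + hi) / 2] ≤ x))
          · rfl
          · exact absurd ((hPdef _).mp hv) hc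
        have hstep : bBisect arr x left lo hi = bBisect arr x left lo ((lo + hi) / 2) := by
          rw [bBisect]; simp only [h, dif_pos, hcond, Bool.false_eq_true, if_false]
        rw [hstep]
        have := ih ((lo + hi) / 2 - lo) (by omega) lo ((lo + hi) / 2) rfl (by omega) (by omega)
          hlo
          (by
            intro j hj hjge hPj
            rcases Nat.eq_or_lt_of_le hjge with heq | hlt
            · subst heq; exact hc hPj
            · exact hc (hmono _ _ (hsort ((lo + hi) / 2) j hmidlen hj hlt) hPj))
        exact ⟨this.1, by omega, this.2.2⟩
    · have hEq : bBisect arr x left lo hi = lo := by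
        rw [bBisect]; simp [h]
      rw [hEq]
      refine ⟨le_rfl, hlohi, ?_⟩
      intro j hj
      constructor
      · intro hjlo; exact hlo j hj hjlo
      · intro hPj
        by_contra hge
        exact hhi2 j hj (by omega) hPj

-- the two top-level bisect calls, characterized on a sorted list
theorem bBisect_count (arr : List Int) (x : Int) (left : Bool)
    (hsorted : List.Pairwise (· ≤ ·) arr) :
    bBisect arr x left 0 arr.length ≤ arr.length ∧
    (∀ j (h : j < arr.length),
      (j < bBisect arr x left 0 arr.length ↔ (if left = true then arr[j] < x else arr[j] ≤ x))) := by
  have h := bBisect_go arr x left (fun v => if left = true then v < x else v ≤ x)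
    (by intro v; cases left <;> simp)
    (by intro u v huv; cases left <;> dsimp <;> omega)
    hsorted (arr.length - 0) 0 arr.length rfl le_rfl (Nat.zero_le _)
    (by intro j h hj; omega)
    (by intro j h hj; exact absurd h (by omega))
  exact ⟨h.2.1, h.2.2⟩

-- prefix-max structure
def pmSpec (m : Int) : List Int → List Int
  | [] => []
  | v :: rest => max m v :: pmSpec (max m v) rest

theorem pmLoop_eq : ∀ (rest : List Int) (m : Int) (out : List Int),
    pmLoop m out rest = out ++ pmSpec m rest := by
  intro rest
  induction rest with
  | nil => intro m out; simp [pmLoop, pmSpec]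
  | cons v r ih => intro m out; simp [pmLoop, pmSpec, ih]

theorem pmSpec_length : ∀ (l : List Int) (m : Int), (pmSpec m l).length = l.length := by
  intro l
  induction l with
  | nil => intro m; rfl
  | cons v r ih => intro m; simp [pmSpec, ih]

theorem bPrefixMax_length (xs : List Int) : (bPrefixMax xs).length = xs.length := by
  cases xs with
  | nil => rfl
  | cons v r => simp [bPrefixMax, pmLoop_eq, pmSpec_length]

theorem pmSpec_getElem : ∀ (rest : List Int) (m : Int) (j : Nat)
    (h : j < (pmSpec m rest).length),
    (pmSpec m rest)[j] = (rest.take (j+1)).foldl max m := by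
  intro rest
  induction rest with
  | nil => intro m j h; simp [pmSpec] at h
  | cons v r ih =>
    intro m j h
    cases j with
    | zero => simp [pmSpec]
    | succ k =>
      simp only [pmSpec, List.getElem_cons_succ]
      exact ih (max m v) k (by simpa [pmSpec] using h)

theorem bPrefixMax_getElem (e0 : Int) (rest : List Int) (j : Nat)
    (h : j < (bPrefixMax (e0 :: rest)).length) :
    (bPrefixMax (e0 :: rest))[j] = (rest.take j).foldl max e0 := by
  have hrw : bPrefixMax (e0 :: rest) = e0 :: pmSpec e0 rest := by
    simp [bPrefixMax, pmLoop_eq]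
  simp only [hrw] at h ⊢
  cases j with
  | zero => simp
  | succ k =>
    simp only [List.getElem_cons_succ]
    have := pmSpec_getElem rest e0 k (by simpa using h)
    simpa using this

theorem le_foldl_max_iff (l : List Int) (m x : Int) :
    x ≤ l.foldl max m ↔ x ≤ m ∨ ∃ y ∈ l, x ≤ y := by
  constructor
  · intro hx
    rcases PySem.List.foldl_max_mem l m with h | h
    · left; omega
    · right; exact ⟨_, h, hx⟩
  · intro hx
    rcases hx with h | ⟨y, hy, hxy⟩
    · exact le_trans h (PySem.List.le_foldl_max l m).1
    · exact le_trans hxy ((PySem.List.le_foldl_max l m).2 y hy)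

theorem foldl_min_le_iff (l : List Int) (m b : Int) :
    l.foldl min m ≤ b ↔ m ≤ b ∨ ∃ y ∈ l, y ≤ b := by
  constructor
  · intro hx
    rcases PySem.List.foldl_min_mem l m with h | h
    · left; omega
    · right; exact ⟨_, h, hx⟩
  · intro hx
    rcases hx with h | ⟨y, hy, hxy⟩
    · exact le_trans (PySem.List.foldl_min_le l m).1 h
    · exact le_trans ((PySem.List.foldl_min_le l m).2 y hy) hxy

theorem bPrefixMax_le_iff (xs : List Int) (k : Nat) (hk : 0 < k) (hk2 : k ≤ xs.length) (x : Int) :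
    (x ≤ (bPrefixMax xs).getD (k-1) 0) ↔ ∃ j, ∃ h : j < xs.length, j < k ∧ x ≤ xs[j] := by
  cases xs with
  | nil => simp at hk2; omega
  | cons e0 rest =>
    have hlen : k - 1 < (bPrefixMax (e0 :: rest)).length := by
      rw [bPrefixMax_length]; simp at hk2 ⊢; omega
    rw [List.getD_eq_getElem _ 0 hlen, bPrefixMax_getElem e0 rest (k-1) hlen,
      le_foldl_max_iff]
    constructor
    · rintro (h | ⟨y, hy, hxy⟩)
      · exact ⟨0, by simp, by omega, h⟩
      · rcases List.mem_take_iff_getElem.mp hy with ⟨s, hs, hrs⟩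
        refine ⟨s+1, by simp; omega, by omega, ?_⟩
        simpa [hrs] using hxy
    · rintro ⟨j, hj, hjk, hxj⟩
      cases j with
      | zero => left; simpa using hxj
      | succ s =>
        right
        refine ⟨rest[s]'(by simp at hj; omega), ?_, by simpa using hxj⟩
        exact List.mem_take_iff_getElem.mpr ⟨s, by simp at hj ⊢; omega, rfl⟩

-- suffix-min structure
def smSpec (m : Int) : List Int → List Int
  | [] => []
  | v :: rest => min m v :: smSpec (min m v) rest

theorem smLoop_eq : ∀ (rest : List Int) (m : Int) (out : List Int),
    smLoop m out rest = out ++ smSpec m rest := by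
  intro rest
  induction rest with
  | nil => intro m out; simp [smLoop, smSpec]
  | cons v r ih => intro m out; simp [smLoop, smSpec, ih]

theorem smSpec_length : ∀ (l : List Int) (m : Int), (smSpec m l).length = l.length := by
  intro l
  induction l with
  | nil => intro m; rfl
  | cons v r ih => intro m; simp [smSpec, ih]

theorem smSpec_getElem : ∀ (rest : List Int) (m : Int) (j : Nat)
    (h : j < (smSpec m rest).length),
    (smSpec m rest)[j] = (rest.take (j+1)).foldl min m := by
  intro rest
  induction rest with
  | nil => intro m j h; simp [smSpec] at h
  | cons v r ih =>
    intro m j h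
    cases j with
    | zero => simp [smSpec]
    | succ k =>
      simp only [smSpec, List.getElem_cons_succ]
      exact ih (min m v) k (by simpa [smSpec] using h)

theorem bSuffixMin_le_iff (xs : List Int) (j : Nat) (hj : j < xs.length) (b : Int) :
    ((bSuffixMin xs).getD j 0 ≤ b) ↔ ∃ i, ∃ h : i < xs.length, j ≤ i ∧ xs[i] ≤ b := by
  cases hrev : xs.reverse with
  | nil =>
    have : xs = [] := List.reverse_eq_nil_iff.mp hrev
    subst this; simp at hj
  | cons m rest =>
    have hn : xs.length = rest.length + 1 := by
      have := congrArg List.length hrev; simp at this; omega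
    have hcast : ∀ {i1 i2 : Nat} (h1 : i1 < xs.length) (h2 : i2 < xs.length), i1 = i2 → xs[i1] = xs[i2] := by
      intro i1 i2 h1 h2 he; subst he; rfl
    have hm : m = xs[xs.length - 1]'(by omega) := by
      have h0 : (xs.reverse)[0]'(by simp; omega) = m := by simp [hrev]
      rw [List.getElem_reverse] at h0
      simpa using h0.symm
    have hrest : ∀ (s : Nat) (hs : s < rest.length), rest[s] = xs[xs.length - 1 - (s+1)]'(by omega) := by
      intro s hs
      have h1 : (xs.reverse)[s+1]'(by simp; omega) = rest[s] := by simp [hrev]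
      rw [List.getElem_reverse] at h1
      exact h1.symm
    have hL : bSuffixMin xs = (m :: smSpec m rest).reverse := by
      simp [bSuffixMin, hrev, smLoop_eq]
    have hjlen : j < (bSuffixMin xs).length := by
      rw [hL]; simp [smSpec_length]; omega
    have hcastL : ∀ {i1 i2 : Nat} (h1 : i1 < (m :: smSpec m rest).length) (h2 : i2 < (m :: smSpec m rest).length), i1 = i2 → (m :: smSpec m rest)[i1] = (m :: smSpec m rest)[i2] := by
      intro i1 i2 h1 h2 he; subst he; rfl
    have hgd : (bSuffixMin xs).getD j 0 = (m :: smSpec m rest)[xs.length - 1 - j]'(by simp [smSpec_length]; omega) := by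
      rw [List.getD_eq_getElem _ 0 hjlen]
      have h2 : (bSuffixMin xs)[j]'hjlen = ((m :: smSpec m rest).reverse)[j]'(by simp [smSpec_length]; omega) := by
        simp only [hL]
      rw [h2, List.getElem_reverse]
      exact hcastL _ _ (by simp [smSpec_length, hn])
    rw [hgd]
    by_cases hje : j = xs.length - 1
    · have ht : xs.length - 1 - j = 0 := by omega
      rw [hcastL (by simp [smSpec_length]; omega) (by simp) ht]
      change m ≤ b ↔ _
      constructor
      · intro hmb
        exact ⟨xs.length - 1, by omega, by omega, by rw [← hm]; exact hmb⟩
      · rintro ⟨i, hi, hji, hib⟩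
        have : i = xs.length - 1 := by omega
        rw [hm]
        calc xs[xs.length - 1]'(by omega) = xs[i] := hcast _ _ (by omega)
          _ ≤ b := hib
    · have ht : xs.length - 1 - j = (xs.length - 2 - j) + 1 := by omega
      rw [hcastL (by simp [smSpec_length]; omega) (by simp [smSpec_length]; omega) ht]
      rw [List.getElem_cons_succ, smSpec_getElem rest m (xs.length - 2 - j) (by rw [smSpec_length]; omega)]
      rw [foldl_min_le_iff]
      constructor
      · rintro (hmb | ⟨y, hy, hyb⟩)
        · exact ⟨xs.length - 1, by omega, by omega, by rw [← hm]; exact hmb⟩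
        · rcases List.mem_take_iff_getElem.mp hy with ⟨s, hs, hrs⟩
          have hs2 : s < rest.length := by omega
          refine ⟨xs.length - 1 - (s+1), by omega, by omega, ?_⟩
          rw [← hrest s hs2, hrs]
          exact hyb
      · rintro ⟨i, hi, hji, hib⟩
        by_cases hie : i = xs.length - 1
        · left
          rw [hm]
          calc xs[xs.length - 1]'(by omega) = xs[i] := hcast _ _ (by omega)
            _ ≤ b := hib
        · right
          have hs2 : xs.length - 2 - i < rest.length := by omega
          refine ⟨rest[xs.length - 2 - i], List.mem_take_iff_getElem.mpr ⟨xs.length - 2 - i, by omega, rfl⟩, ?_⟩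
          rw [hrest _ hs2]
          calc xs[xs.length - 1 - (xs.length - 2 - i + 1)]'(by omega) = xs[i] := hcast _ _ (by omega)
            _ ≤ b := hib

-- stab query: some busy interval (s, e) has s ≤ x ≤ e
theorem bStab_iff (busy : List (Int × Int))
    (hs : List.Pairwise (fun p q => p.1 ≤ q.1) busy) (x : Int) :
    bStab (busy.map (fun p => p.1)) (bPrefixMax (busy.map (fun p => p.2))) x = true
      ↔ ∃ i, ∃ h : i < busy.length, busy[i].1 ≤ x ∧ x ≤ busy[i].2 := by
  have hsorted : List.Pairwise (· ≤ ·) (busy.map (fun p => p.1)) := by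
    rw [List.pairwise_map]; exact hs
  have hcount := bBisect_count (busy.map (fun p => p.1)) x false hsorted
  simp only [Bool.false_eq_true, if_false, List.length_map, List.getElem_map] at hcount
  unfold bStab
  simp only [Bool.and_eq_true, decide_eq_true_eq, List.length_map, ge_iff_le]
  constructor
  · rintro ⟨hk0, hle⟩
    rcases (bPrefixMax_le_iff (busy.map (fun p => p.2)) _ hk0 (by simpa using hcount.1) x).mp hle with ⟨j, hj, hjk, hxj⟩
    have hjb : j < busy.length := by simpa using hj
    exact ⟨j, hjb, (hcount.2 j hjb).mp hjk, by simpa using hxj⟩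
  · rintro ⟨i, hi, h1, h2⟩
    have hik := (hcount.2 i hi).mpr h1
    have hk0 : 0 < bBisect (busy.map (fun p => p.1)) x false 0 busy.length := by omega
    refine ⟨hk0, ?_⟩
    exact (bPrefixMax_le_iff (busy.map (fun p => p.2)) _ hk0 (by simpa using hcount.1) x).mpr
      ⟨i, by simpa using hi, hik, by simpa using h2⟩

-- containment query: some busy interval (s, e) has a ≤ s and e ≤ b
theorem bEnclosed_iff (busy : List (Int × Int))
    (hs : List.Pairwise (fun p q => p.1 ≤ q.1) busy) (a b : Int) :
    bEnclosed (busy.map (fun p => p.1)) (bSuffixMin (busy.map (fun p => p.2))) a b = true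
      ↔ ∃ i, ∃ h : i < busy.length, a ≤ busy[i].1 ∧ busy[i].2 ≤ b := by
  have hsorted : List.Pairwise (· ≤ ·) (busy.map (fun p => p.1)) := by
    rw [List.pairwise_map]; exact hs
  have hcount := bBisect_count (busy.map (fun p => p.1)) a true hsorted
  simp only [if_pos, List.length_map, List.getElem_map] at hcount
  unfold bEnclosed
  simp only [Bool.and_eq_true, decide_eq_true_eq, List.length_map]
  constructor
  · rintro ⟨hlt, hle⟩
    rcases (bSuffixMin_le_iff (busy.map (fun p => p.2)) _ (by simpa using hlt) b).mp hle with ⟨i, hi, hji, hib⟩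
    have hib' : i < busy.length := by simpa using hi
    refine ⟨i, hib', ?_, by simpa using hib⟩
    have h2 := (hcount.2 i hib').not.mp (by omega)
    omega
  · rintro ⟨i, hi, h1, h2⟩
    have hinotlt : ¬ (i < bBisect (busy.map (fun p => p.1)) a true 0 busy.length) := by
      intro hcon
      have := (hcount.2 i hi).mp hcon
      omega
    have hjlt : bBisect (busy.map (fun p => p.1)) a true 0 busy.length < busy.length := by omega
    refine ⟨hjlt, ?_⟩
    exact (bSuffixMin_le_iff (busy.map (fun p => p.2)) _ (by simpa using hjlt) b).mpr
      ⟨i, by simpa using hi, by omega, by simpa using h2⟩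

-- per person: B's three queries decide exactly A's per-calendar scan
theorem person_eq (ab : Int × Int) (cal : List (Int × Int)) :
    (!(bStab (bPrep cal).1 (bPrep cal).2.1 ab.2 || bStab (bPrep cal).1 (bPrep cal).2.1 ab.1
        || bEnclosed (bPrep cal).1 (bPrep cal).2.2 ab.1 ab.2))
      = aAttend ab cal := by
  have hs : List.Pairwise (fun p q : Int × Int => p.1 ≤ q.1) (PySem.List.sorted cal (fun iv => iv.1)) :=
    PySem.List.sorted_pairwise cal (fun iv => iv.1)
  have hperm := PySem.List.sorted_perm cal (fun iv => iv.1) false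
  rw [aAttend_eq_not_any]
  apply congrArg
  rw [Bool.eq_iff_iff]
  simp only [Bool.or_eq_true, List.any_eq_true, Bool.and_eq_true, decide_eq_true_eq, bPrep]
  rw [bStab_iff _ hs ab.2, bStab_iff _ hs ab.1, bEnclosed_iff _ hs ab.1 ab.2]
  have hmem : ∀ P : (Int × Int) → Prop,
      (∃ ex ∈ cal, P ex) ↔ ∃ i, ∃ h : i < (PySem.List.sorted cal (fun iv => iv.1)).length,
        P ((PySem.List.sorted cal (fun iv => iv.1))[i]) := by
    intro P
    rw [← List.exists_mem_iff_getElem]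
    constructor
    · rintro ⟨ex, hex, hP⟩; exact ⟨ex, hperm.mem_iff.mpr hex, hP⟩
    · rintro ⟨ex, hex, hP⟩; exact ⟨ex, hperm.mem_iff.mp hex, hP⟩
  rw [hmem]
  constructor
  · rintro ((⟨i, h, h1, h2⟩ | ⟨i, h, h1, h2⟩) | ⟨i, h, h1, h2⟩)
    · exact ⟨i, h, Or.inl (Or.inl ⟨h1, h2⟩)⟩
    · exact ⟨i, h, Or.inl (Or.inr ⟨h1, h2⟩)⟩
    · exact ⟨i, h, Or.inr ⟨h1, h2⟩⟩
  · rintro ⟨i, h, ((⟨h1, h2⟩ | ⟨h1, h2⟩) | ⟨h1, h2⟩)⟩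
    · exact Or.inl (Or.inl ⟨i, h, h1, h2⟩)
    · exact Or.inl (Or.inr ⟨i, h, h1, h2⟩)
    · exact Or.inr ⟨i, h, h1, h2⟩

-- a dict built by inserting f k for every k of a list reads back f on the list's members
theorem getD_foldl_insert_skip (f : (Int × Int) → Bool) (ts : List (Int × Int)) (s : Int × Int)
    (hns : s ∉ ts) : ∀ (d : PySem.Dict (Int × Int) Bool),
    PySem.Dict.getD (ts.foldl (fun d k => PySem.Dict.insert d k (f k)) d) s false
      = PySem.Dict.getD d s false := by
  induction ts with
  | nil => intro d; rfl
  | cons u us ih =>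
    intro d
    have hsu : s ≠ u := by intro h; exact hns (h ▸ List.mem_cons_self)
    have hnus : s ∉ us := fun h => hns (List.mem_cons_of_mem _ h)
    simp only [List.foldl_cons]
    rw [ih hnus]
    exact PySem.Dict.getD_insert_of_ne d (f u) false hsu

theorem getD_foldl_insert (f : (Int × Int) → Bool) (l : List (Int × Int)) (s : Int × Int)
    (hmem : s ∈ l) : ∀ (d : PySem.Dict (Int × Int) Bool),
    PySem.Dict.getD (l.foldl (fun d k => PySem.Dict.insert d k (f k)) d) s false = f s := by
  induction l with
  | nil => exact absurd hmem (List.not_mem_nil)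
  | cons t ts ih =>
    intro d
    by_cases hts : s ∈ ts
    · simpa using ih hts (PySem.Dict.insert d t (f t))
    · have hst : s = t := by rcases List.mem_cons.mp hmem with h | h; exact h; exact absurd h hts
      subst hst
      simp only [List.foldl_cons]
      rw [getD_foldl_insert_skip f ts s hts]
      exact PySem.Dict.getD_insert_self d s (f s) false

-- filtering each personal list then concatenating = concatenating then filtering
theorem flatMap_filter_comm (p : (Int × Int) → Bool) (l : List (List (Int × Int))) :
    l.flatMap (fun xs => xs.filter p) = (l.flatMap (fun xs => xs)).filter p := by
  induction l with
  | nil => rfl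
  | cons xs rest ih => simp [List.flatMap_cons, List.filter_append, ih]

-- ===== VERDICT (by name: the statement is the Claim_ definition above) =====
theorem get_possible_meetings_spec : Claim_equal_get_possible_meetings := by
  intro calendars available_slots min_people _
  unfold Spec_get_possible_meetings
  unfold get_possible_meetings get_possible_meetings_alt
  simp only [PySem.List.foldl_append_singleton_eq_map, List.nil_append,
    PySem.List.foldl_if_add_one, PySem.List.foldl_append_ite_eq_filter,
    PySem.List.foldl_append_eq_flatMap]
  rw [flatMap_filter_comm]
  apply List.filter_congr
  intro ab hab
  rw [getD_foldl_insert _ _ ab ((PySem.List.mem_dedup _ ab).mpr hab)]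
  unfold bCanHold
  simp only [PySem.List.foldl_if_add_one]
  congr 1
  rw [List.countP_map]
  have hc : List.countP
      ((fun p => !(bStab p.1 p.2.1 ab.2 || bStab p.1 p.2.1 ab.1 || bEnclosed p.1 p.2.2 ab.1 ab.2)) ∘ bPrep)
      calendars = List.countP (fun cal => aAttend ab cal) calendars := by
    apply List.countP_congr
    intro cal _
    simp only [Function.comp_apply]
    rw [person_eq ab cal]
  rw [hc]
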